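-- pv_equiv track=rewrite | github.com/tcripe4/CptS_355 | HW3/HW3.py | searchDicts
-- ===== SOURCE A (Python) =====
-- def searchDicts(L, k):
--     count = 0
--     i = -1  # starts at end
--     while count < len(L):
--         if L[i].get(k, None) is None:
--             i -= 1
--             count += 1
--         else:
--             return L[i].get(k, None)
-- ===== SOURCE B (Python) =====
-- def searchDicts(L, k):
--     result = None
--     for d in L:
--         v = d.get(k)
--         if v is not None:
--             result = v
--     return result
-- ===== Notes on version B (the rewrite author's own statement) =====
-- stated objective: simpler
-- what changed: Replaced the backward while-loop with negative indexing and early return by a single forward for-loop that keeps a 'last match' accumulator and returns it at the end.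
import Mathlib
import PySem

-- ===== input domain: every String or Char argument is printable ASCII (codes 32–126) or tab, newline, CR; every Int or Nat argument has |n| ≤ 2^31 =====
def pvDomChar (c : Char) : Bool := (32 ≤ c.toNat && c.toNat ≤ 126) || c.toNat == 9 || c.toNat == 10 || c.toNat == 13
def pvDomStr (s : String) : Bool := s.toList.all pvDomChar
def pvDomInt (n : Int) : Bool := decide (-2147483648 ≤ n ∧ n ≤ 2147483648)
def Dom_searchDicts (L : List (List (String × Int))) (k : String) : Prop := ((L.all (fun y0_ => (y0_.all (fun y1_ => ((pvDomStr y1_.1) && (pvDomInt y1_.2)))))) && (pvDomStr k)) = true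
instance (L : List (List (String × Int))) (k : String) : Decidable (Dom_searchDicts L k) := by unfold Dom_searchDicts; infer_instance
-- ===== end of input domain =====

-- B replaces A's backward while-loop (negative indices, early return) by a forward
-- fold keeping a 'last match' accumulator; objective: simpler.

-- ===== PORT A =====
-- the while loop: state is (count, i); i is always -(1+count), so the index is in
-- range whenever count < len(L) and the `none` branch of pyGet? is never reached
-- from the top-level call.
def searchDictsLoop (L : List (List (String × Int))) (k : String)
    (count : Nat) (i : Int) : Option Int :=
  if _h : count < L.length then
    match PySem.List.pyGet? L i with
    | none => none
    | some d =>
      match (PySem.Dict.mk d).get? k with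
      | none => searchDictsLoop L k (count + 1) (i - 1)
      | some _ => (PySem.Dict.mk d).get? k
  else none
termination_by L.length - count

def searchDicts (L : List (List (String × Int))) (k : String) : Option Int :=
  searchDictsLoop L k 0 (-1)

-- ===== PORT B =====
def searchDicts_alt (L : List (List (String × Int))) (k : String) : Option Int :=
  L.foldl (fun result d =>
    match (PySem.Dict.mk d).get? k with
    | none => result
    | some v => some v) none

-- ===== PRECONDITION & SPEC =====
def Spec_searchDicts (L : List (List (String × Int))) (k : String) (out : Option Int) : Prop := out = searchDicts_alt L k
instance (L : List (List (String × Int))) (k : String) (out : Option Int) : Decidable (Spec_searchDicts L k out) := by unfold Spec_searchDicts; infer_instance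

-- ===== CLAIM (what is proved, stated in full; the proofs are below) =====
def Claim_equal_searchDicts : Prop := ∀ (L : List (List (String × Int))) (k : String), Dom_searchDicts L k → Spec_searchDicts L k (searchDicts L k)

-- ===== LEMMAS AND PROOFS =====

-- B's fold equals a first-match scan over the reversed list, joined with the accumulator.
theorem foldl_last_match (k : String) (l : List (List (String × Int))) (init : Option Int) :
    l.foldl (fun result d =>
      match (PySem.Dict.mk d).get? k with
      | none => result
      | some v => some v) init
    = (l.reverse.findSome? (fun d => (PySem.Dict.mk d).get? k)).or init := by
  induction l generalizing init with
  | nil => simp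
  | cons d t ih =>
    simp only [List.foldl_cons, ih, List.reverse_cons, List.findSome?_append]
    cases ht : t.reverse.findSome? (fun d => (PySem.Dict.mk d).get? k) <;>
      cases hd : (PySem.Dict.mk d).get? k <;>
      simp [List.findSome?, hd, Option.or]

-- A's loop from state (count, -(1+count)) is the first match scanning the first
-- (len - count) elements back-to-front.
theorem loopA_eq (L : List (List (String × Int))) (k : String) :
    ∀ count : Nat, count ≤ L.length →
      searchDictsLoop L k count (-(1 + (count : Int)))
      = (L.take (L.length - count)).reverse.findSome? (fun d => (PySem.Dict.mk d).get? k) := by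
  intro count hle
  induction hn : L.length - count generalizing count with
  | zero =>
    have hc : count = L.length := by omega
    rw [searchDictsLoop]
    simp [hc]
  | succ m ih =>
    have hlt : count < L.length := by omega
    have hidx : -(1 + (count : Int)) = -((count + 1 : Nat) : Int) := by push_cast; ring
    have hgetm : PySem.List.pyGet? L (-(1 + (count : Int))) = some L[m] := by
      rw [hidx, PySem.List.pyGet?_neg_natCast L (count + 1) (by omega) (by omega)]
      have hm : L.length - (count + 1) = m := by omega
      rw [hm]; exact List.getElem?_eq_getElem (by omega)
    have htake : (L.take (m + 1)).reverse = L[m] :: (L.take m).reverse := by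
      rw [List.take_add_one, List.getElem?_eq_getElem (by omega)]
      simp
    rw [searchDictsLoop, htake]
    simp only [hlt, dif_pos, hgetm]
    cases hd : (PySem.Dict.mk L[m]).get? k with
    | some v => simp [List.findSome?, hd]
    | none =>
      simp only [hd, List.findSome?]
      have harg : -(1 + (count : Int)) - 1 = -(1 + ((count + 1 : Nat) : Int)) := by
        push_cast; ring
      rw [harg, ih (count + 1) (by omega) (by omega)]

-- ===== VERDICT (by name: the statement is the Claim_ definition above) =====
theorem searchDicts_spec : Claim_equal_searchDicts := by
  intro L k _
  unfold Spec_searchDicts searchDicts searchDicts_alt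
  have h0 : (-1 : Int) = -(1 + ((0 : Nat) : Int)) := by norm_num
  rw [h0, loopA_eq L k 0 (Nat.zero_le _), foldl_last_match]
  simp
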